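-- pv_equiv track=rewrite | github.com/jilwang84/M-DESIGN | graph_comparison/graph_comparison.py | create_rank_vectors
-- ===== SOURCE A (Python) =====
-- def create_rank_vectors(property_ranks, dataset_names, feature_names):
--     """
--     Create rank vectors for each dataset.
--
--     Args:
--         property_ranks (dict): Mapping from property name to dataset ranks.
--         dataset_names (list): List of dataset names.
--         feature_names (list): List of feature names.
--
--     Returns:
--         dict: Mapping from dataset name to rank vector (list of ranks).
--     """
--     dataset_rank_vectors = {name: [] for name in dataset_names}
--     for feature in feature_names:
--         ranks = property_ranks[feature]
--         for name in dataset_names: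
--             rank = ranks.get(name, None)
--             if rank is None:
--                 raise ValueError(f"Dataset {name} does not have a rank for property {feature}")
--             dataset_rank_vectors[name].append(rank)
--     return dataset_rank_vectors
-- ===== SOURCE B (Python) =====
-- def create_rank_vectors(property_ranks, dataset_names, feature_names):
--     """Build the rank table feature-major (one row per feature), then transpose
--     it into one column per dataset."""
--     rows = []
--     for feature in feature_names:
--         ranks = property_ranks[feature]
--         row = []
--         for name in dataset_names:
--             rank = ranks.get(name)
--             if rank is None:
--                 raise ValueError(f"Dataset {name} does not have a rank for property {feature}")
--             row.append(rank)
--         rows.append(row)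
--     return {name: [row[i] for row in rows] for i, name in enumerate(dataset_names)}
-- ===== Notes on version B (the rewrite author's own statement) =====
-- stated objective: alternative
-- what changed: B builds the full feature-major table of rank rows first and then transposes it into per-dataset columns in a separate pass, instead of A's interleaved per-feature appends into a pre-created per-dataset dict; Pre_ additionally excludes dataset_names lists with duplicate names when feature_names is nonempty, on which A's repeated appends into the shared dict entry produce an accidental repeated-rank vector while a plain transpose keeps one column per occurrence.
import Mathlib
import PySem

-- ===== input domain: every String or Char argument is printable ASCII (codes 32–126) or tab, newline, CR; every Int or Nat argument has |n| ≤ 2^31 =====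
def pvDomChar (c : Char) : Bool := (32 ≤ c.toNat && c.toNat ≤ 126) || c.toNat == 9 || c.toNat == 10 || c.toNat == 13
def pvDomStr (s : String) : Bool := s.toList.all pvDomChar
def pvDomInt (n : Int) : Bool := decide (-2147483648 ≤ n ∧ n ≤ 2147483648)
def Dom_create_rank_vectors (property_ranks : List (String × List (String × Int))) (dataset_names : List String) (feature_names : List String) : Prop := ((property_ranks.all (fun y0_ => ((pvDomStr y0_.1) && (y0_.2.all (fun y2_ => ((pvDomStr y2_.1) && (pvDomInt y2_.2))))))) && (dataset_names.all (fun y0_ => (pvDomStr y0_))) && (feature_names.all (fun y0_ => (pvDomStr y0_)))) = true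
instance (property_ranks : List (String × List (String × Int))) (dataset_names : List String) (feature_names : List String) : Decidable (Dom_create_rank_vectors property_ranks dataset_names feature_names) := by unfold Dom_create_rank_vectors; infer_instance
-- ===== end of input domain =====

-- B builds the feature-major table of rank rows first and then transposes it into per-dataset
-- columns in a separate pass, instead of A's interleaved per-feature appends into a pre-created
-- per-dataset dict (alternative decomposition, same cost).


-- ===== PORT A =====
-- property_ranks[feature]: first-match lookup in the association list (Python dict lookup; KeyError → outside Pre_)
def pvRanksOf (property_ranks : List (String × List (String × Int))) (f : String) : List (String × Int) :=
  ((property_ranks.find? (fun p => p.1 == f)).map (·.2)).getD []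

def create_rank_vectors (property_ranks : List (String × List (String × Int))) (dataset_names : List String) (feature_names : List String) : List (String × List Int) :=
  -- dataset_rank_vectors = {name: [] for name in dataset_names}
  let d0 : PySem.Dict String (List Int) :=
    dataset_names.foldl (fun d n => d.insert n []) PySem.Dict.empty
  -- for feature in feature_names: ranks = property_ranks[feature]; for name …: append ranks.get(name)
  let dfin : PySem.Dict String (List Int) :=
    feature_names.foldl (fun d f =>
      let ranks : PySem.Dict String Int := PySem.Dict.mk (pvRanksOf property_ranks f)
      dataset_names.foldl (fun d n =>
        match ranks.get? n with
        | some r => d.modify n [] (fun v => v ++ [r])   -- dataset_rank_vectors[name].append(rank)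
        | none => d)                                    -- Python raises ValueError here: outside Pre_
        d) d0
  dfin.items

-- ===== PORT B =====
def create_rank_vectors_alt (property_ranks : List (String × List (String × Int))) (dataset_names : List String) (feature_names : List String) : List (String × List Int) :=
  -- rows: for each feature, the row of ranks across dataset_names (row.append(rank); ValueError → outside Pre_)
  let rows : List (List Int) :=
    feature_names.map (fun f =>
      let ranks : PySem.Dict String Int := PySem.Dict.mk (pvRanksOf property_ranks f)
      dataset_names.map (fun n => (ranks.get? n).getD 0))
  -- {name: [row[i] for row in rows] for i, name in enumerate(dataset_names)}
  ((PySem.List.enumerate dataset_names).foldl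
      (fun d p => d.insert p.2 (rows.map (fun row => (PySem.List.pyGet? row p.1).getD 0)))
      PySem.Dict.empty).items

-- ===== PRECONDITION & SPEC =====
-- Pre_ excludes (a) exactly the inputs on which A raises — a feature missing from property_ranks
-- (KeyError) or a dataset name missing from that feature's ranks (ValueError) — and (b) dataset_names
-- with duplicate names when there is at least one feature, on which A's repeated appends into the
-- shared dict entry produce an accidental repeated-rank vector (a defensible corner either way;
-- B keeps one column per occurrence).
def Pre_create_rank_vectors (property_ranks : List (String × List (String × Int))) (dataset_names : List String) (feature_names : List String) : Prop :=
  (feature_names.all (fun f =>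
     (property_ranks.find? (fun p => p.1 == f)).isSome &&
     dataset_names.all (fun n => ((PySem.Dict.mk (pvRanksOf property_ranks f)).get? n).isSome)) = true)
  ∧ (feature_names = [] ∨ dataset_names.Nodup)
instance (property_ranks : List (String × List (String × Int))) (dataset_names : List String) (feature_names : List String) : Decidable (Pre_create_rank_vectors property_ranks dataset_names feature_names) := by unfold Pre_create_rank_vectors; infer_instance

def pvWitness_create_rank_vectors : (List (String × List (String × Int))) × List String × List String :=
  ([("f", [("x", 1), ("y", 2)]), ("g", [("y", 4), ("x", 3)])], ["x", "y"], ["f", "g"])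

def Spec_create_rank_vectors (property_ranks : List (String × List (String × Int))) (dataset_names : List String) (feature_names : List String) (out : List (String × List Int)) : Prop := out = create_rank_vectors_alt property_ranks dataset_names feature_names
instance (property_ranks : List (String × List (String × Int))) (dataset_names : List String) (feature_names : List String) (out : List (String × List Int)) : Decidable (Spec_create_rank_vectors property_ranks dataset_names feature_names out) := by unfold Spec_create_rank_vectors; infer_instance

-- ===== CLAIM (what is proved, stated in full; the proofs are below) =====
def Claim_equal_create_rank_vectors : Prop := ∀ (property_ranks : List (String × List (String × Int))) (dataset_names : List String) (feature_names : List String), Dom_create_rank_vectors property_ranks dataset_names feature_names → Pre_create_rank_vectors property_ranks dataset_names feature_names → Spec_create_rank_vectors property_ranks dataset_names feature_names (create_rank_vectors property_ranks dataset_names feature_names)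

-- ===== LEMMAS AND PROOFS =====

-- the rank A appends / B tabulates for feature f and dataset n (under Pre_ the lookup is some)
def pvRk (property_ranks : List (String × List (String × Int))) (f n : String) : Int :=
  ((PySem.Dict.mk (pvRanksOf property_ranks f)).get? n).getD 0

-- both sides reduce to this canonical table: first-occurrence name order, per feature one rank
-- per occurrence of the name
def pvCanon (property_ranks : List (String × List (String × Int))) (dn fn : List String) : List (String × List Int) :=
  (PySem.Set.ofList dn).map (fun n =>
    (n, fn.flatMap (fun f => List.replicate (dn.count n) (pvRk property_ranks f n))))

-- inner loop of A, with the match resolved to a modify under Pre_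
lemma pv_inner_eq_modify (property_ranks : List (String × List (String × Int))) (f : String)
    (dn : List String)
    (hsome : ∀ n ∈ dn, ((PySem.Dict.mk (pvRanksOf property_ranks f)).get? n).isSome)
    (d : PySem.Dict String (List Int)) :
    dn.foldl (fun d n =>
        match (PySem.Dict.mk (pvRanksOf property_ranks f)).get? n with
        | some r => d.modify n [] (fun v => v ++ [r])
        | none => d) d
    = dn.foldl (fun d n => d.modify n [] (fun v => v ++ [pvRk property_ranks f n])) d := by
  apply PySem.List.foldl_congr_mem
  intro acc n hn
  obtain ⟨r, hr⟩ := Option.isSome_iff_exists.mp (hsome n hn)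
  simp [hr, pvRk]

lemma pv_update_subset (s dn : List String) (h : ∀ x ∈ dn, x ∈ s) :
    PySem.Set.update s dn = s := by
  rw [PySem.Set.update_eq_append_filter]
  have : (PySem.Set.ofList dn).filter (fun y => !(PySem.Set.contains s y)) = [] := by
    apply List.filter_eq_nil_iff.mpr
    intro y hy
    have : y ∈ s := h y ((PySem.List.mem_dedup dn y).mp hy)
    simp [this]
  rw [this, List.append_nil]

lemma pv_modify_keys (dn : List String) (g : String → Int)
    (d : PySem.Dict String (List Int)) (h : ∀ n ∈ dn, n ∈ d.keys) :
    (dn.foldl (fun d n => d.modify n [] (fun v => v ++ [g n])) d).keys = d.keys := by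
  rw [PySem.Dict.keys_foldl_modify, pv_update_subset _ _ h]

lemma pv_modify_getD (dn : List String) (g : String → Int)
    (d : PySem.Dict String (List Int)) (c : String) :
    (dn.foldl (fun d n => d.modify n [] (fun v => v ++ [g n])) d).getD c []
      = d.getD c [] ++ List.replicate (dn.count c) (g c) := by
  have h1 : dn.foldl (fun d n => d.modify n [] (fun v => v ++ [g n])) d
      = (dn.map (fun n => (n, g n))).foldl (fun d p => d.modify p.1 [] (fun v => v ++ [p.2])) d := by
    rw [List.foldl_map]
  rw [h1, PySem.Dict.getD_foldl_modify_append]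
  have h2 : (dn.map (fun n => (n, g n))).filter (fun p => p.1 == c)
      = (dn.filter (fun n => n == c)).map (fun n => (n, g n)) := by
    rw [List.filter_map]; rfl
  rw [h2, List.filter_beq, List.map_map, List.map_replicate]
  rfl

-- the feature loop of A, characterised (ds = the dict's key list)
lemma pv_outer (property_ranks : List (String × List (String × Int)))
    (dn : List String) (fn : List String)
    (hsome : ∀ f ∈ fn, ∀ n ∈ dn, ((PySem.Dict.mk (pvRanksOf property_ranks f)).get? n).isSome)
    (d : PySem.Dict String (List Int)) (hnd : d.keys.Nodup) (hmem : ∀ n ∈ dn, n ∈ d.keys) :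
    (fn.foldl (fun d f =>
        dn.foldl (fun d n =>
          match (PySem.Dict.mk (pvRanksOf property_ranks f)).get? n with
          | some r => d.modify n [] (fun v => v ++ [r])
          | none => d) d) d).items
    = d.keys.map (fun n =>
        (n, d.getD n [] ++ fn.flatMap (fun f => List.replicate (dn.count n) (pvRk property_ranks f n)))) := by
  induction fn generalizing d with
  | nil =>
      simp only [List.foldl_nil, List.flatMap_nil, List.append_nil]
      exact PySem.Dict.items_eq_map_keys d hnd []
  | cons f fs ih =>
      rw [List.foldl_cons, pv_inner_eq_modify property_ranks f dn
        (hsome f (List.mem_cons_self)) d]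
      rw [ih (fun g hg n hn => hsome g (List.mem_cons_of_mem _ hg) n hn) _
        (by rw [pv_modify_keys dn _ d hmem]; exact hnd)
        (by rw [pv_modify_keys dn _ d hmem]; exact hmem)]
      rw [pv_modify_keys dn _ d hmem]
      apply List.map_congr_left
      intro n _
      rw [pv_modify_getD dn _ d n]
      simp [List.flatMap_cons]

-- the initial dict {name: [] for name in dataset_names}
lemma pv_d0_getD (dn : List String) (d : PySem.Dict String (List Int))
    (h : ∀ n, d.getD n [] = []) (n : String) :
    (dn.foldl (fun d n => d.insert n ([] : List Int)) d).getD n [] = [] := by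
  induction dn generalizing d with
  | nil => exact h n
  | cons x xs ih =>
      rw [List.foldl_cons]
      apply ih
      intro m
      rw [PySem.Dict.getD_insert]
      split_ifs with hm
      · rfl
      · exact h m

lemma pv_d0_keys (dn : List String) :
    (dn.foldl (fun d n => d.insert n ([] : List Int)) PySem.Dict.empty).keys
      = PySem.Set.ofList dn := by
  rw [PySem.Dict.keys_foldl_insert]
  rw [PySem.Dict.keys_empty, PySem.Set.update_nil_left]

-- A in canonical form
lemma pv_A_eq (property_ranks : List (String × List (String × Int)))
    (dn fn : List String)
    (hsome : ∀ f ∈ fn, ∀ n ∈ dn, ((PySem.Dict.mk (pvRanksOf property_ranks f)).get? n).isSome) :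
    create_rank_vectors property_ranks dn fn = pvCanon property_ranks dn fn := by
  unfold create_rank_vectors pvCanon
  rw [pv_outer property_ranks dn fn hsome _
    (by rw [pv_d0_keys]; exact PySem.Set.nodup_ofList dn)
    (by intro n hn; rw [pv_d0_keys]; exact (PySem.List.mem_dedup dn n).mpr hn)]
  rw [pv_d0_keys]
  apply List.map_congr_left
  intro n _
  rw [pv_d0_getD dn PySem.Dict.empty (fun _ => rfl) n, List.nil_append]

-- B directly: a fresh-key insert loop over enumerate appends one item per (index, name) pair

-- a fresh-key insert loop over enumerate appends one item per (index, name) pair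
lemma pv_items_insert_enum {β : Type} (dn : List String) (hnd : dn.Nodup)
    (v : Int × String → β) :
    ((PySem.List.enumerate dn).foldl (fun d p => d.insert p.2 (v p)) PySem.Dict.empty).items
      = (PySem.List.enumerate dn).map (fun p => (p.2, v p)) := by
  rw [PySem.Dict.items_foldl_insert_fresh (PySem.List.enumerate dn) (fun p => p.2) v
      PySem.Dict.empty
      (fun a _ => PySem.Dict.contains_empty _)
      (by rw [PySem.List.map_snd_enumerate]; exact hnd)]
  rw [show (PySem.Dict.empty : PySem.Dict String β).items = [] from rfl, List.nil_append]

-- reading a per-index value that only depends on the name collapses the enumerate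
lemma pv_enum_map {β : Type} (dn : List String) (v : Int × String → β) (g : String → β)
    (h : ∀ (k : Nat) (hk : k < dn.length), v ((k : Int), dn[k]) = g dn[k]) :
    (PySem.List.enumerate dn).map (fun p => (p.2, v p)) = dn.map (fun n => (n, g n)) := by
  calc (PySem.List.enumerate dn).map (fun p => (p.2, v p))
      = (PySem.List.enumerate dn).map (fun p => (p.2, g p.2)) := by
        apply List.map_congr_left
        intro p hp
        obtain ⟨k, hk, hpk⟩ := (PySem.List.mem_enumerate_iff _ _ _).mp hp
        subst hpk
        refine congrArg (Prod.mk _) ?_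
        show v ((0 : Int) + k, dn[k]) = g dn[k]
        rw [zero_add]
        exact h k hk
    _ = ((PySem.List.enumerate dn).map (fun p => p.2)).map (fun n => (n, g n)) := by
        rw [List.map_map]; rfl
    _ = dn.map (fun n => (n, g n)) := by
        rw [PySem.List.map_snd_enumerate]

lemma pv_B_eq (property_ranks : List (String × List (String × Int)))
    (dn fn : List String) (hnd : dn.Nodup) :
    create_rank_vectors_alt property_ranks dn fn
      = dn.map (fun n => (n, fn.map (fun f => pvRk property_ranks f n))) := by
  unfold create_rank_vectors_alt
  dsimp only
  rw [pv_items_insert_enum dn hnd _]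
  apply pv_enum_map
  intro k hk
  rw [List.map_map]
  apply List.map_congr_left
  intro f _
  show (PySem.List.pyGet? (dn.map fun n => ((PySem.Dict.mk (pvRanksOf property_ranks f)).get? n).getD 0) (k : Int)).getD 0
    = pvRk property_ranks f dn[k]
  rw [PySem.List.pyGet?_natCast, List.getElem?_map, List.getElem?_eq_getElem hk]
  simp [pvRk]

lemma pv_canon_nodup (property_ranks : List (String × List (String × Int)))
    (dn fn : List String) (hnd : dn.Nodup) :
    pvCanon property_ranks dn fn
      = dn.map (fun n => (n, fn.map (fun f => pvRk property_ranks f n))) := by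
  unfold pvCanon
  have hself : PySem.Set.ofList dn = dn := PySem.Set.ofList_eq_self_of_nodup dn hnd
  rw [hself]
  apply List.map_congr_left
  intro n hn
  have hc : dn.count n = 1 := List.count_eq_one_of_mem hnd hn
  rw [hc]
  simp only [List.replicate_one]
  refine congrArg (Prod.mk n) ?_
  induction fn with
  | nil => rfl
  | cons a t ih => simp [List.flatMap_cons, ih]

-- B with no features: every dataset gets the empty vector, in first-occurrence order
lemma pv_B_nil (property_ranks : List (String × List (String × Int))) (dn : List String) :
    create_rank_vectors_alt property_ranks dn []
      = (PySem.Set.ofList dn).map (fun n => (n, ([] : List Int))) := by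
  unfold create_rank_vectors_alt
  dsimp only
  simp only [List.map_nil]
  have h2 : (PySem.List.enumerate dn).foldl
      (fun d p => d.insert p.2 ([] : List Int)) PySem.Dict.empty
      = dn.foldl (fun d n => d.insert n ([] : List Int)) PySem.Dict.empty := by
    conv_rhs => rw [← PySem.List.map_snd_enumerate dn 0]
    rw [List.foldl_map]
  rw [h2, PySem.Dict.items_eq_map_keys _
      (by rw [pv_d0_keys]; exact PySem.Set.nodup_ofList dn) ([] : List Int), pv_d0_keys]
  apply List.map_congr_left
  intro n _
  rw [pv_d0_getD dn PySem.Dict.empty (fun _ => rfl) n]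

theorem create_rank_vectors_spec : Claim_equal_create_rank_vectors := by
  intro property_ranks dataset_names feature_names _ hpre
  obtain ⟨hall, hdisj⟩ := hpre
  have hsome : ∀ f ∈ feature_names, ∀ n ∈ dataset_names,
      ((PySem.Dict.mk (pvRanksOf property_ranks f)).get? n).isSome := by
    intro f hf n hn
    have h1 := List.all_eq_true.mp hall f hf
    have h2 := (Bool.and_eq_true _ _).mp h1 |>.2
    have h3 := List.all_eq_true.mp h2 n hn
    simpa using h3
  unfold Spec_create_rank_vectors
  rcases hdisj with hfe | hnd
  · subst hfe
    rw [pv_A_eq property_ranks dataset_names [] hsome, pv_B_nil]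
    unfold pvCanon
    simp
  · rw [pv_A_eq property_ranks dataset_names feature_names hsome,
        pv_B_eq property_ranks dataset_names feature_names hnd,
        pv_canon_nodup property_ranks dataset_names feature_names hnd]
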